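-- pv_equiv track=rewrite | github.com/V-RA-SANTHOSH/ALAKAZAM | app/backend/utils/ir_retrieval.py | _rank_results
-- ===== SOURCE A (Python) =====
-- from typing import List
--
-- def _rank_results(evidence_list: List[str], claim: str) -> List[str]:
--     """
--     Rank evidence by keyword overlap with claim
--     """
--     claim_words = set(claim.lower().split())
--
--     scored = []
--     for ev in evidence_list:
--         ev_words = set(ev.lower().split())
--         score = len(claim_words.intersection(ev_words))
--         scored.append((ev, score))
--
--     scored.sort(key=lambda x: x[1], reverse=True)
--
--     # Return top 5 evidence snippets
--     return [ev for ev, _ in scored[:5]]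
-- ===== SOURCE B (Python) =====
-- from typing import List
--
-- def _rank_results(evidence_list: List[str], claim: str) -> List[str]:
--     """Rank evidence by keyword overlap with claim (bucket/counting sort)."""
--     claim_words = set(claim.lower().split())
--     buckets = [[] for _ in range(len(claim_words) + 1)]
--     for ev in evidence_list:
--         score = len(claim_words & set(ev.lower().split()))
--         buckets[score].append(ev)
--     ranked = []
--     for bucket in reversed(buckets):
--         ranked += bucket
--     return ranked[:5]
-- ===== Notes on version B (the rewrite author's own statement) =====
-- stated objective: alternative
-- what changed: Replaces the stable comparison sort over (evidence, score) pairs by a counting/bucket sort: scores are bounded by the number of claim words, so each evidence is appended to the bucket of its score and buckets are concatenated from highest score down, preserving the stable tie order.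
import Mathlib
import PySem

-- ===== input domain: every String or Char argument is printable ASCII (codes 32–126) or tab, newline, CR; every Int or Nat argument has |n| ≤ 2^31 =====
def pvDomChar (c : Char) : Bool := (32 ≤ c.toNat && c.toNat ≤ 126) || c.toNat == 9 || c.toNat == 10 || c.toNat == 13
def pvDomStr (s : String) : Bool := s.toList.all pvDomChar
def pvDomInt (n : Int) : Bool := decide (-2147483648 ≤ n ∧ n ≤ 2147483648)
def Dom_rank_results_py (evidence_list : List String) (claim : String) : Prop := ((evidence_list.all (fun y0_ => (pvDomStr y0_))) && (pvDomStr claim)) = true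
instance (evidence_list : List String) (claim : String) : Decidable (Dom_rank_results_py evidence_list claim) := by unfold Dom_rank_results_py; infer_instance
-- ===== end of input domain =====

-- B replaces A's stable reverse comparison sort by a counting/bucket sort over the bounded scores (objective: alternative).

-- ===== PORT A =====
def rank_results_py (evidence_list : List String) (claim : String) : List String :=
  let claim_words := PySem.Set.ofList (PySem.Str.split₀ (PySem.Str.lower claim))
  let scored := evidence_list.foldl (fun acc ev =>
    let ev_words := PySem.Set.ofList (PySem.Str.split₀ (PySem.Str.lower ev))
    let score := PySem.Set.len (PySem.Set.inter claim_words ev_words)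
    acc ++ [(ev, score)]) []
  let scored2 := PySem.List.sorted scored (fun x => x.2) true
  (PySem.List.slice scored2 none (some 5)).map (fun p => p.1)

-- ===== PORT B =====
def rank_results_py_alt (evidence_list : List String) (claim : String) : List String :=
  let claim_words := PySem.Set.ofList (PySem.Str.split₀ (PySem.Str.lower claim))
  let buckets0 : List (List String) := List.replicate (claim_words.length + 1) []
  let buckets := evidence_list.foldl (fun bs ev =>
    let score := PySem.Set.len (PySem.Set.inter claim_words (PySem.Set.ofList (PySem.Str.split₀ (PySem.Str.lower ev))))
    PySem.List.pySetD bs score (PySem.List.pyGetD bs score [] ++ [ev])) buckets0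
  let ranked := buckets.reverse.foldl (fun acc b => acc ++ b) []
  PySem.List.slice ranked none (some 5)

-- ===== PRECONDITION & SPEC =====
def Spec_rank_results_py (evidence_list : List String) (claim : String) (out : List String) : Prop := out = rank_results_py_alt evidence_list claim
instance (evidence_list : List String) (claim : String) (out : List String) : Decidable (Spec_rank_results_py evidence_list claim out) := by unfold Spec_rank_results_py; infer_instance

-- ===== CLAIM (what is proved, stated in full; the proofs are below) =====
def Claim_equal_rank_results_py : Prop := ∀ (evidence_list : List String) (claim : String), Dom_rank_results_py evidence_list claim → Spec_rank_results_py evidence_list claim (rank_results_py evidence_list claim)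

-- ===== LEMMAS AND PROOFS =====

-- [n-1, n-2, ..., 0]
def pvDesc : Nat → List Nat
  | 0 => []
  | n + 1 => n :: pvDesc n

theorem pvMem_desc {s n : Nat} (h : s ∈ pvDesc n) : s < n := by
  induction n with
  | zero => cases h
  | succ m ih =>
    rcases List.mem_cons.mp h with h | h
    · omega
    · exact Nat.lt_succ_of_lt (ih h)

theorem pvDesc_eq_range_reverse (n : Nat) : pvDesc n = (List.range n).reverse := by
  induction n with
  | zero => rfl
  | succ m ih => simp [pvDesc, List.range_succ, ih]

theorem pvDesc_split (n k : Nat) (hk : k ≤ n) :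
    ∃ A, pvDesc (n + 1) = A ++ k :: pvDesc k ∧ ∀ s ∈ A, k < s := by
  induction n with
  | zero =>
    refine ⟨[], ?_, by simp⟩
    have : k = 0 := by omega
    simp [this, pvDesc]
  | succ m ih =>
    by_cases h : k = m + 1
    · exact ⟨[], by simp [h, pvDesc], by simp⟩
    · obtain ⟨A, hA, hAgt⟩ := ih (by omega)
      refine ⟨(m + 1) :: A, ?_, ?_⟩
      · rw [show pvDesc (m + 1 + 1) = (m + 1) :: pvDesc (m + 1) from rfl, hA]; rfl
      intro s hs
      rcases List.mem_cons.mp hs with h' | h'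
      · omega
      · exact hAgt s h'

theorem pvInsertBy_append_all {α : Type} (before : α → α → Bool) (x : α) (P Q : List α)
    (hP : ∀ p ∈ P, before x p = false) (hQ : ∀ q ∈ Q, before x q = true) :
    PySem.List.insertBy before x (P ++ Q) = P ++ x :: Q := by
  induction P with
  | nil =>
    cases Q with
    | nil => rfl
    | cons q Q' => simp [PySem.List.insertBy, hQ q (by simp)]
  | cons p P' ih =>
    have hp : before x p = false := hP p (by simp)
    simp [PySem.List.insertBy, hp]
    exact ih (fun p hp' => hP p (by simp [hp']))

theorem pvInsert_bucket {α : Type} (key : α → Int) (x : α) (k n : Nat) (hk : k ≤ n)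
    (hx : key x = (k : Int)) (g : Nat → List α) (hg : ∀ s, ∀ y ∈ g s, key y = (s : Int)) :
    PySem.List.insertBy (fun a b => decide (key b < key a)) x ((pvDesc (n + 1)).flatMap g)
      = (pvDesc (n + 1)).flatMap (fun s => if s = k then g s ++ [x] else g s) := by
  obtain ⟨A, hA, hAgt⟩ := pvDesc_split n k hk
  rw [hA]
  have hsplit : (A ++ k :: pvDesc k).flatMap g = (A.flatMap g ++ g k) ++ (pvDesc k).flatMap g := by
    simp [List.flatMap_append, List.flatMap_cons, List.append_assoc]
  rw [hsplit, pvInsertBy_append_all]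
  · have h1 : A.flatMap (fun s => if s = k then g s ++ [x] else g s) = A.flatMap g := by
      apply List.flatMap_congr
      intro s hs
      have := hAgt s hs
      simp [show s ≠ k by omega]
    have h2 : (pvDesc k).flatMap (fun s => if s = k then g s ++ [x] else g s) = (pvDesc k).flatMap g := by
      apply List.flatMap_congr
      intro s hs
      have := pvMem_desc hs
      simp [show s ≠ k by omega]
    simp [List.flatMap_append, List.flatMap_cons, h1, h2]
  · intro p hp
    rcases List.mem_append.mp hp with hp | hp
    · obtain ⟨s, hs, hy⟩ := List.mem_flatMap.mp hp
      have := hg s p hy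
      have := hAgt s hs
      simp [‹key p = (s : Int)›, hx]
      omega
    · have := hg k p hp
      simp [this, hx]
  · intro q hq
    obtain ⟨s, hs, hy⟩ := List.mem_flatMap.mp hq
    have hks := pvMem_desc hs
    have := hg s q hy
    simp [this, hx]
    omega

theorem pvSorted_rev_buckets {α : Type} (key : α → Int) (n : Nat) (xs : List α)
    (h : ∀ x ∈ xs, ∃ k ≤ n, key x = (k : Int)) :
    PySem.List.sorted xs key true
      = (pvDesc (n + 1)).flatMap (fun (s : Nat) => xs.filter (fun y => decide (key y = (s : Int)))) := by
  induction xs using List.reverseRecOn with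
  | nil => simp [PySem.List.sorted]
  | append_singleton l x ih =>
    obtain ⟨k, hk, hx⟩ := h x (by simp)
    have hstep : PySem.List.sorted (l ++ [x]) key true
        = PySem.List.insertBy (fun a b => decide (key b < key a)) x (PySem.List.sorted l key true) := by
      rw [PySem.List.sorted_rev_eq_foldl_insertBy, List.foldl_append, List.foldl_cons,
        List.foldl_nil, ← PySem.List.sorted_rev_eq_foldl_insertBy]
    rw [hstep, ih (fun y hy => h y (by simp [hy])),
      pvInsert_bucket key x k n hk hx _
        (fun s y hy => of_decide_eq_true (List.of_mem_filter (p := fun y => decide (key y = (s : Int))) hy))]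
    apply List.flatMap_congr
    intro s _
    by_cases hsk : s = k
    · simp [hsk, List.filter_append, hx]
    · have : ¬ key x = (s : Int) := by
        rw [hx]; intro hc; exact hsk (by exact_mod_cast hc.symm)
      simp [hsk, List.filter_append, this]

theorem pvBuckets_inv {α : Type} (f : α → Nat) (n : Nat) (l : List α)
    (h : ∀ ev ∈ l, f ev ≤ n) :
    l.foldl (fun bs ev => PySem.List.pySetD bs ((f ev : Nat) : Int)
        (PySem.List.pyGetD bs ((f ev : Nat) : Int) [] ++ [ev])) (List.replicate (n + 1) [])
      = (List.range (n + 1)).map (fun (s : Nat) => l.filter (fun ev => decide (f ev = s))) := by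
  induction l using List.reverseRecOn with
  | nil => apply List.ext_getElem <;> simp
  | append_singleton l x ih =>
    rw [List.foldl_append, List.foldl_cons, List.foldl_nil, ih (fun e he => h e (by simp [he]))]
    rw [PySem.List.pyGetD_natCast, PySem.List.pySetD_natCast]
    have hfx : f x < n + 1 := by have := h x (by simp); omega
    have hget : ((List.range (n + 1)).map (fun (s : Nat) => l.filter (fun ev => decide (f ev = s)))).getD (f x) []
        = l.filter (fun ev => decide (f ev = f x)) := by
      rw [List.getD_eq_getElem?_getD]
      simp [hfx]
    rw [hget]
    apply List.ext_getElem
    · simp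
    · intro i hi1 hi2
      have hi : i < n + 1 := by simpa using hi1
      rw [List.getElem_set]
      by_cases hik : f x = i
      · simp [hik, List.filter_append]
      · simp [hik, List.filter_append]

theorem pvA_side (l : List String) (cw : List String) :
    (PySem.List.slice (PySem.List.sorted (l.foldl (fun acc ev =>
        acc ++ [(ev, PySem.Set.len (PySem.Set.inter cw (PySem.Set.ofList (PySem.Str.split₀ (PySem.Str.lower ev)))))]) [])
      (fun x => x.2) true) none (some 5)).map (fun p => p.1)
    = List.take 5 ((pvDesc (cw.length + 1)).flatMap (fun (s : Nat) =>
        l.filter (fun ev => decide ((PySem.Set.inter cw (PySem.Set.ofList (PySem.Str.split₀ (PySem.Str.lower ev)))).length = s)))) := by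
  set f : String → Nat := fun ev =>
    (PySem.Set.inter cw (PySem.Set.ofList (PySem.Str.split₀ (PySem.Str.lower ev)))).length with hf
  rw [PySem.List.foldl_append_singleton_eq_map, List.nil_append]
  rw [pvSorted_rev_buckets (fun (p : String × Int) => p.2) cw.length _
    (by intro x hp
        obtain ⟨ev, hev, rfl⟩ := List.mem_map.mp hp
        refine ⟨f ev, ?_, by simp [PySem.Set.len, hf]⟩
        simpa [hf, PySem.Set.inter] using List.length_filter_le _ cw)]
  rw [show (some (5 : Int)) = some ((5 : Nat) : Int) from by norm_num, PySem.List.slice_to_natCast, List.map_take]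
  apply congrArg (List.take 5)
  rw [List.map_flatMap]
  apply List.flatMap_congr
  intro s _
  rw [List.filter_map, List.map_map]
  have : (fun p => p.1) ∘ (fun ev => (ev, PySem.Set.len (PySem.Set.inter cw (PySem.Set.ofList (PySem.Str.split₀ (PySem.Str.lower ev)))))) = (id : String → String) := rfl
  rw [this, List.map_id]
  apply List.filter_congr
  intro ev _
  simp [PySem.Set.len, hf]

theorem pvB_side (l : List String) (cw : List String) :
    PySem.List.slice ((l.foldl (fun bs ev =>
        PySem.List.pySetD bs (PySem.Set.len (PySem.Set.inter cw (PySem.Set.ofList (PySem.Str.split₀ (PySem.Str.lower ev)))))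
          (PySem.List.pyGetD bs (PySem.Set.len (PySem.Set.inter cw (PySem.Set.ofList (PySem.Str.split₀ (PySem.Str.lower ev))))) [] ++ [ev]))
        (List.replicate (cw.length + 1) ([] : List String))).reverse.foldl (fun acc b => acc ++ b) []) none (some 5)
    = List.take 5 ((pvDesc (cw.length + 1)).flatMap (fun (s : Nat) =>
        l.filter (fun ev => decide ((PySem.Set.inter cw (PySem.Set.ofList (PySem.Str.split₀ (PySem.Str.lower ev)))).length = s)))) := by
  set f : String → Nat := fun ev =>
    (PySem.Set.inter cw (PySem.Set.ofList (PySem.Str.split₀ (PySem.Str.lower ev)))).length with hf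
  have hstep : (fun (bs : List (List String)) ev =>
        PySem.List.pySetD bs (PySem.Set.len (PySem.Set.inter cw (PySem.Set.ofList (PySem.Str.split₀ (PySem.Str.lower ev)))))
          (PySem.List.pyGetD bs (PySem.Set.len (PySem.Set.inter cw (PySem.Set.ofList (PySem.Str.split₀ (PySem.Str.lower ev))))) [] ++ [ev]))
      = (fun bs ev => PySem.List.pySetD bs ((f ev : Nat) : Int)
          (PySem.List.pyGetD bs ((f ev : Nat) : Int) [] ++ [ev])) := by
    funext bs ev; simp [PySem.Set.len, hf]
  rw [hstep, pvBuckets_inv f cw.length l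
    (fun ev _ => by simpa [hf, PySem.Set.inter] using List.length_filter_le _ cw)]
  rw [PySem.List.foldl_append_eq_flatten, List.nil_append, ← List.map_reverse,
    ← pvDesc_eq_range_reverse, ← List.flatMap_def,
    show (some (5 : Int)) = some ((5 : Nat) : Int) from by norm_num, PySem.List.slice_to_natCast]

theorem pvRank_eq (evidence_list : List String) (claim : String) :
    rank_results_py evidence_list claim = rank_results_py_alt evidence_list claim :=
  (pvA_side evidence_list (PySem.Set.ofList (PySem.Str.split₀ (PySem.Str.lower claim)))).trans
    (pvB_side evidence_list (PySem.Set.ofList (PySem.Str.split₀ (PySem.Str.lower claim)))).symm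

-- ===== VERDICT (by name: the statement is the Claim_ definition above) =====
theorem rank_results_py_spec : Claim_equal_rank_results_py := by
  intro evidence_list claim _
  unfold Spec_rank_results_py
  exact pvRank_eq evidence_list claim
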